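-- pv_equiv track=rewrite | github.com/stvngo/Assignments | DSC20 Assignments/Homework/hw06.py | outsmart_dragon
-- ===== SOURCE A (Python) =====
-- def corrupt_password(input, to_insert):
--     """
--     Corrupts the given string by inserting the new string after each character
--     of the given string.
--
--     >>> corrupt_password('dragon', '#')
--     'd#r#a#g#o#n#'
--     >>> corrupt_password('', '@')
--     ''
--     >>> corrupt_password('I can help', '-')
--     'I- -c-a-n- -h-e-l-p-'
--
--     # Add AT LEAST 3 doctests below, DO NOT delete this line
--     >>> corrupt_password('password', '*')
--     'p*a*s*s*w*o*r*d*'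
--     >>> corrupt_password('1234', '+')
--     '1+2+3+4+'
--     >>> corrupt_password('A', '!')
--     'A!'
--     """
--     if len(input) == 0:
--         return ""
--     else:
--         return input[0] + to_insert + corrupt_password(input[1:], to_insert)
--
-- def outsmart_dragon(lst, password, to_insert):
--     """
--     Takes a list of strings, a password as a string, and a character,
--     corrupting all strings (the same way as in the previous problem)
--     in the list except those that match the password exactly.
--
--     >>> outsmart_dragon(['dragon'], 'dragon','#')
--     ['dragon']
--     >>> outsmart_dragon([], 'dragon','@')
--     []
--     >>> outsmart_dragon(['help me', 'dragon'], 'dragon','-')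
--     ['h-e-l-p- -m-e-', 'dragon']
--     >>> outsmart_dragon(['help me', 'dear dragon'], 'dragon','-')
--     ['h-e-l-p- -m-e-', 'd-e-a-r- -d-r-a-g-o-n-']
--     >>> outsmart_dragon(['DrAgOn', 'Dragon'], 'dragon','-')
--     ['D-r-A-g-O-n-', 'D-r-a-g-o-n-']
--
--     # Add AT LEAST 3 doctests below, DO NOT delete this line
--     >>> outsmart_dragon(['dragon', 'dragons', 'DRAGON'], 'dragon', '*')
--     ['dragon', 'd*r*a*g*o*n*s*', 'D*R*A*G*O*N*']
--     >>> outsmart_dragon(['drag'], 'dragon','@')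
--     ['d@r@a@g@']
--     >>> outsmart_dragon(['secret', 'password'], 'password', '?')
--     ['s?e?c?r?e?t?', 'password']
--     """
--     if len(lst) == 0:
--         return []
--     if lst[0] == password:
--         return [lst[0]] + outsmart_dragon(lst[1:], password, to_insert)
--     else:
--         return [corrupt_password(lst[0], to_insert)] + \
--             outsmart_dragon(lst[1:], password, to_insert)
-- ===== SOURCE B (Python) =====
-- def outsmart_dragon(lst, password, to_insert):
--     return [s if s == password else ''.join(c + to_insert for c in s)
--             for s in lst]
-- ===== Notes on version B (the rewrite author's own statement) =====
-- stated objective: faster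
-- what changed: Replaces the double recursion (per-character string recursion with slicing + concatenation inside a per-element list recursion) by a single flat list comprehension that joins c + to_insert over each string's characters.
import Mathlib
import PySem

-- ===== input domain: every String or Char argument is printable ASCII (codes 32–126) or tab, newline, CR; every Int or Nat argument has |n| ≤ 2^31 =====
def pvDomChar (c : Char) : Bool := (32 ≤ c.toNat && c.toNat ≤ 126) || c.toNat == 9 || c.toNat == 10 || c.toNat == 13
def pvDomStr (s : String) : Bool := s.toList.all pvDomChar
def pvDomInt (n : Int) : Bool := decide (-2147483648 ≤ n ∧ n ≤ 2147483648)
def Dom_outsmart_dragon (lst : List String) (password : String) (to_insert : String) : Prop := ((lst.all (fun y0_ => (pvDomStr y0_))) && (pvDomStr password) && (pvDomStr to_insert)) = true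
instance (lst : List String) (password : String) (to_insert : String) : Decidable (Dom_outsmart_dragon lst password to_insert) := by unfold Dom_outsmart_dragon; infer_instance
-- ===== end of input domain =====

-- B: one flat list comprehension with a per-character join instead of A's double recursion (simpler).
-- ===== PORT A =====
-- corrupt_password: head + to_insert + recurse on the tail (on the char list)
def pvCorruptA (input : List Char) (to_insert : List Char) : List Char :=
  match input with
  | [] => []
  | c :: rest => [c] ++ to_insert ++ pvCorruptA rest to_insert

def outsmart_dragon (lst : List String) (password : String) (to_insert : String) : List String :=
  match lst with
  | [] => []
  | s :: rest =>
    if s = password then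
      [s] ++ outsmart_dragon rest password to_insert
    else
      [String.mk (pvCorruptA s.toList to_insert.toList)] ++ outsmart_dragon rest password to_insert

-- ===== PORT B =====
def outsmart_dragon_alt (lst : List String) (password : String) (to_insert : String) : List String :=
  lst.map (fun s =>
    if s = password then s
    else String.mk (s.toList.flatMap (fun c => c :: to_insert.toList)))

-- ===== PRECONDITION & SPEC =====
def Spec_outsmart_dragon (lst : List String) (password : String) (to_insert : String) (out : List String) : Prop := out = outsmart_dragon_alt lst password to_insert
instance (lst : List String) (password : String) (to_insert : String) (out : List String) : Decidable (Spec_outsmart_dragon lst password to_insert out) := by unfold Spec_outsmart_dragon; infer_instance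

-- ===== CLAIM (what is proved, stated in full; the proofs are below) =====
def Claim_equal_outsmart_dragon : Prop := ∀ (lst : List String) (password : String) (to_insert : String), Dom_outsmart_dragon lst password to_insert → Spec_outsmart_dragon lst password to_insert (outsmart_dragon lst password to_insert)

-- ===== LEMMAS AND PROOFS =====

-- ===== VERDICT (by name: the statement is the Claim_ definition above) =====
theorem pvCorruptA_eq_flatMap (cs ins : List Char) :
    pvCorruptA cs ins = cs.flatMap (fun c => c :: ins) := by
  induction cs with
  | nil => rfl
  | cons c rest ih => simp [pvCorruptA, ih]

theorem outsmart_dragon_eq_alt (lst : List String) (password to_insert : String) :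
    outsmart_dragon lst password to_insert = outsmart_dragon_alt lst password to_insert := by
  induction lst with
  | nil => rfl
  | cons s rest ih =>
    simp only [outsmart_dragon, outsmart_dragon_alt, List.map_cons, pvCorruptA_eq_flatMap]
    by_cases h : s = password <;> simp [h, outsmart_dragon_alt] at ih ⊢ <;> exact ih

theorem outsmart_dragon_spec : Claim_equal_outsmart_dragon := by
  intro lst password to_insert _
  exact outsmart_dragon_eq_alt lst password to_insert
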